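-- pv_equiv track=rewrite | github.com/armenta-i/leetcode | trash.py | solution
-- ===== SOURCE A (Python) =====
-- def solution(A, B):
--     def count_pieces(length, stick1, stick2):
--         return (stick1 // length) + (stick2 // length)
--
--     def can_form_square(length, stick1, stick2):
--         return count_pieces(length, stick1, stick2) >= 4
--
--     for length in range(min(A, B), 0, -1):
--         if can_form_square(length, A, B):
--             return length
--     return 0
-- ===== SOURCE B (Python) =====
-- def solution(A, B):
--     lo, hi = 1, min(A, B)
--     ans = 0
--     while lo <= hi:
--         mid = (lo + hi) // 2
--         if A // mid + B // mid >= 4: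
--             ans = mid
--             lo = mid + 1
--         else:
--             hi = mid - 1
--     return ans
-- ===== Notes on version B (the rewrite author's own statement) =====
-- stated objective: faster
-- what changed: Replaces A's downward linear scan over candidate lengths with a binary search on the length, using the fact that the piece count A//L + B//L is non-increasing in L.
import Mathlib
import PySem

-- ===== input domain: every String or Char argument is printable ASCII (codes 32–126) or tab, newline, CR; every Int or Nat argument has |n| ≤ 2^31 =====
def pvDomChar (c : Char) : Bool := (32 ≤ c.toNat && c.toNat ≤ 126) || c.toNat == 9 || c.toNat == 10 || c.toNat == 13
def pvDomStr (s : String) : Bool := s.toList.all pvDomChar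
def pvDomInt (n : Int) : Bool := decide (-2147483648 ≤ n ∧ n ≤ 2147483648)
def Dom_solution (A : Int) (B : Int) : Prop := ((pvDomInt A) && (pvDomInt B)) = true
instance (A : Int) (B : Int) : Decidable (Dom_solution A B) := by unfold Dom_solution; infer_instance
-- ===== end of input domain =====

-- B replaces A's downward linear scan over lengths with a binary search on the length
-- (piece count is non-increasing in the length), for an asymptotic speed-up.


-- ===== PORT A =====
-- can_form_square(length, A, B): count_pieces = A//length + B//length, test ≥ 4
def canFormSquare (len stick1 stick2 : Int) : Bool :=
  PySem.Int.floordiv stick1 len + PySem.Int.floordiv stick2 len ≥ 4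

-- for length in range(min(A,B), 0, -1): lengths n, n-1, …, 1 where n = min(A,B)
def loopA (A B : Int) : Nat → Int
  | 0 => 0
  | n + 1 => if canFormSquare ((n : Int) + 1) A B then (n : Int) + 1 else loopA A B n

def solution (A : Int) (B : Int) : Int := loopA A B (min A B).toNat

-- ===== PORT B =====
-- while lo <= hi: binary search; fuel bounds the iteration count (hi-lo+1 shrinks each step)
def bsearch (A B : Int) : Nat → Int → Int → Int → Int
  | 0, _, _, ans => ans
  | fuel + 1, lo, hi, ans =>
      if lo ≤ hi then
        let mid := PySem.Int.floordiv (lo + hi) 2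
        if PySem.Int.floordiv A mid + PySem.Int.floordiv B mid ≥ 4 then
          bsearch A B fuel (mid + 1) hi mid
        else
          bsearch A B fuel lo (mid - 1) ans
      else ans

def solution_alt (A : Int) (B : Int) : Int := bsearch A B (min A B).toNat 1 (min A B) 0

-- ===== PRECONDITION & SPEC =====
def Spec_solution (A : Int) (B : Int) (out : Int) : Prop := out = solution_alt A B
instance (A : Int) (B : Int) (out : Int) : Decidable (Spec_solution A B out) := by unfold Spec_solution; infer_instance

-- ===== CLAIM (what is proved, stated in full; the proofs are below) =====
def Claim_equal_solution : Prop := ∀ (A : Int) (B : Int), Dom_solution A B → Spec_solution A B (solution A B)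

-- ===== LEMMAS AND PROOFS =====

-- floor division by a positive divisor is antitone in the divisor, for a nonnegative dividend
lemma floordiv_anti {x a b : Int} (hx : 0 ≤ x) (ha : 0 < a) (hab : a ≤ b) :
    PySem.Int.floordiv x b ≤ PySem.Int.floordiv x a := by
  have hb : (0:Int) < b := lt_of_lt_of_le ha hab
  rw [PySem.Int.floordiv_eq_ediv_of_pos ha, PySem.Int.floordiv_eq_ediv_of_pos hb]
  have h1 : x / b * b ≤ x := Int.ediv_mul_le x (by omega)
  have h2 : 0 ≤ x / b := Int.ediv_nonneg hx (le_of_lt hb)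
  rw [Int.le_ediv_iff_mul_le ha]
  calc x / b * a ≤ x / b * b := by nlinarith
    _ ≤ x := h1

-- canFormSquare is downward-closed in the length (positive lengths, nonnegative sticks)
lemma canFormSquare_mono {A B a b : Int} (hA : 0 ≤ A) (hB : 0 ≤ B)
    (ha : 0 < a) (hab : a ≤ b) (h : canFormSquare b A B = true) :
    canFormSquare a A B = true := by
  simp only [canFormSquare, decide_eq_true_eq] at *
  have h1 := floordiv_anti hA ha hab
  have h2 := floordiv_anti hB ha hab
  omega

-- loopA returns 0 when no length in [1, n] works
lemma loopA_eq_zero (A B : Int) (n : Nat)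
    (h : ∀ L : Int, 1 ≤ L → L ≤ (n : Int) → canFormSquare L A B = false) :
    loopA A B n = 0 := by
  induction n with
  | zero => rfl
  | succ m ih =>
      simp only [loopA]
      rw [h ((m : Int) + 1) (by omega) (by push_cast; omega)]
      simp only [Bool.false_eq_true, if_false]
      exact ih (fun L h1 h2 => h L h1 (by push_cast; omega))

-- loopA returns k when k works and nothing above it (within [1, n]) does
lemma loopA_eq_of (A B : Int) (n : Nat) (k : Int)
    (hk1 : 1 ≤ k) (hkn : k ≤ (n : Int)) (hk : canFormSquare k A B = true)
    (habove : ∀ L : Int, k < L → L ≤ (n : Int) → canFormSquare L A B = false) :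
    loopA A B n = k := by
  induction n with
  | zero => omega
  | succ m ih =>
      simp only [loopA]
      by_cases hke : k = (m : Int) + 1
      · rw [← hke, hk, if_pos rfl]
      · have hlt : k ≤ (m : Int) := by push_cast at hkn; omega
        rw [habove ((m : Int) + 1) (by omega) (by push_cast; omega)]
        simp only [Bool.false_eq_true, if_false]
        exact ih hlt (fun L h1 h2 => habove L h1 (by push_cast; omega))

-- binary-search invariant: bsearch computes the same answer as loopA
lemma bsearch_eq_loopA (A B : Int) (m : Int) (hA : m ≤ A) (hB : m ≤ B) (hm : 1 ≤ m) :
    ∀ (fuel : Nat) (lo hi ans : Int),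
      (hi - lo + 1).toNat ≤ fuel → 1 ≤ lo → ans = lo - 1 → ans ≤ hi → hi ≤ m →
      (ans = 0 ∨ (1 ≤ ans ∧ canFormSquare ans A B = true)) →
      (∀ L : Int, hi < L → L ≤ m → canFormSquare L A B = false) →
      bsearch A B fuel lo hi ans = loopA A B m.toNat := by
  intro fuel
  induction fuel with
  | zero =>
      intro lo hi ans hfuel hlo hans hanshi hhim hP habove
      have hdone : hi < lo := by omega
      have hanshi' : ans = hi := by omega
      simp only [bsearch]
      rcases hP with h0 | ⟨hP1, hP⟩
      · subst h0
        refine (loopA_eq_zero A B m.toNat ?_).symm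
        intro L h1 h2
        exact habove L (by omega) (by omega)
      · refine (loopA_eq_of A B m.toNat ans (by omega) (by omega) hP ?_).symm
        intro L h1 h2
        exact habove L (by omega) (by omega)
  | succ f ih =>
      intro lo hi ans hfuel hlo hans hanshi hhim hP habove
      simp only [bsearch]
      by_cases hcmp : lo ≤ hi
      · rw [if_pos hcmp]
        obtain ⟨hmid1, hmid2⟩ := PySem.Int.floordiv_two_mid_bounds hcmp
        set mid := PySem.Int.floordiv (lo + hi) 2 with hmiddef
        by_cases hgood : PySem.Int.floordiv A mid + PySem.Int.floordiv B mid ≥ 4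
        · rw [if_pos (by exact hgood)]
          exact ih (mid + 1) hi mid (by omega) (by omega) (by omega) (by omega) hhim
            (Or.inr ⟨by omega, by simp only [canFormSquare, decide_eq_true_eq]; exact hgood⟩) habove
        · rw [if_neg (by exact hgood)]
          refine ih lo (mid - 1) ans (by omega) hlo hans (by omega) (by omega) hP ?_
          intro L hL1 hL2
          by_cases hLhi : hi < L
          · exact habove L hLhi hL2
          · -- mid ≤ L ≤ hi: if L worked, mid would too, by monotonicity
            by_contra hc
            have hLtrue : canFormSquare L A B = true := by
              cases h : canFormSquare L A B with
              | true => rfl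
              | false => exact absurd h hc
            have : canFormSquare mid A B = true :=
              canFormSquare_mono (by omega) (by omega) (by omega) (by omega) hLtrue
            simp only [canFormSquare, decide_eq_true_eq] at this
            omega
      · rw [if_neg hcmp]
        have hansh : ans = hi := by omega
        rcases hP with h0 | ⟨hP1, hP⟩
        · subst h0
          refine (loopA_eq_zero A B m.toNat ?_).symm
          intro L h1 h2
          exact habove L (by omega) (by omega)
        · refine (loopA_eq_of A B m.toNat ans (by omega) (by omega) hP ?_).symm
          intro L h1 h2
          exact habove L (by omega) (by omega)

-- ===== VERDICT (by name: the statement is the Claim_ definition above) =====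
theorem solution_spec : Claim_equal_solution := by
  intro A B _
  unfold Spec_solution solution solution_alt
  set m := min A B with hm
  by_cases hpos : 1 ≤ m
  · have hA : m ≤ A := min_le_left A B
    have hB : m ≤ B := min_le_right A B
    have : m.toNat = (m.toNat : Nat) := rfl
    refine (bsearch_eq_loopA A B m hA hB hpos m.toNat 1 m 0
      (by omega) (by omega) (by omega) (by omega) (le_refl m)
      (Or.inl rfl) (fun L h1 h2 => by omega)).symm ▸ rfl
  · have h0 : m.toNat = 0 := by omega
    rw [h0]
    rfl
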